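-- pv_equiv track=rewrite | github.com/Luminarada80/scBONITA2 | network_simulation/generate_dataset.py | combine_not
-- ===== SOURCE A (Python) =====
-- def combine_not(operators):
--     i = 0
--     while i < len(operators):
--         if operators[i] == 'not' and i + 1 < len(operators):
--             operators[i] = 'not ' + operators[i + 1]
--             del operators[i + 1]
--         else:
--             i += 1
--     return operators
-- ===== SOURCE B (Python) =====
-- # Iterator-based single pass (structural recursion over the list): consume the
-- # token after each 'not' directly from the iterator. A mutates its argument in
-- # place; the equivalence claimed is about the RETURN value only.
-- def combine_not(operators):
--     out = []
--     it = iter(operators)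
--     for tok in it:
--         if tok == 'not':
--             nxt = next(it, None)
--             if nxt is None:
--                 out.append('not')      # trailing 'not' has nothing to merge
--             else:
--                 out.append('not ' + nxt)
--         else:
--             out.append(tok)
--     return out
-- ===== Notes on version B (the rewrite author's own statement) =====
-- stated objective: faster
-- what changed: Replaces the in-place index loop that repeatedly deletes from the list with an iterator-driven single pass (structural recursion in the Lean port) that consumes the token following each 'not' and builds a new output list.
import Mathlib
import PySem

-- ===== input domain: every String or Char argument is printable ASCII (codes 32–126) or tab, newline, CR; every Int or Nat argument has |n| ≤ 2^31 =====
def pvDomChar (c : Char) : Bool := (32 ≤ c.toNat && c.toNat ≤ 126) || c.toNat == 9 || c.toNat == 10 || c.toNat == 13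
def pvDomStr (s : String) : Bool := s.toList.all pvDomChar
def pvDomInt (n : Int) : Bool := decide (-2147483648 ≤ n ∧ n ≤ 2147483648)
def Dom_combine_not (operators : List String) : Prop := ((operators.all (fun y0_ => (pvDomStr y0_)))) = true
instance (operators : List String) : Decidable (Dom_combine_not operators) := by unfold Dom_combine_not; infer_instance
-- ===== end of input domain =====

-- B replaces A's in-place index loop (overwrite + repeated 'del') with an
-- iterator-driven single pass, ported as structural recursion on the list;
-- the equivalence is about the RETURN value only (A mutates its argument).

-- ===== PORT A =====
-- A's while loop: at index i, if operators[i] == 'not' and a next element exists,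
-- overwrite operators[i] and delete operators[i+1] (i unchanged); else i += 1.
def combine_not_loopA (ops : List String) (i : Nat) : List String :=
  if h : i < ops.length then
    if hc : ops.getD i "" = "not" ∧ i + 1 < ops.length then
      combine_not_loopA ((ops.set i ("not " ++ ops.getD (i + 1) "")).eraseIdx (i + 1)) i
    else
      combine_not_loopA ops (i + 1)
  else ops
termination_by ops.length - i
decreasing_by
  · have h2 := hc.2
    simp [List.length_eraseIdx, h2]
    omega
  · omega

def combine_not (operators : List String) : List String :=
  combine_not_loopA operators 0

-- ===== PORT B =====
-- Source B: for tok in it — if tok == 'not', consume the next token from the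
-- iterator (None at the end) and emit the merged token, else emit tok.
def combine_not_alt (operators : List String) : List String :=
  match operators with
  | [] => []
  | tok :: rest =>
    if tok = "not" then
      match rest with
      | [] => ["not"]                                     -- next(it, None) is None
      | nxt :: rest' => ("not " ++ nxt) :: combine_not_alt rest'
    else tok :: combine_not_alt rest

-- ===== PRECONDITION & SPEC =====
def Spec_combine_not (operators : List String) (out : List String) : Prop := out = combine_not_alt operators
instance (operators : List String) (out : List String) : Decidable (Spec_combine_not operators out) := by unfold Spec_combine_not; infer_instance

-- ===== CLAIM (what is proved, stated in full; the proofs are below) =====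
def Claim_equal_combine_not : Prop := ∀ (operators : List String), Dom_combine_not operators → Spec_combine_not operators (combine_not operators)

-- ===== LEMMAS AND PROOFS =====

theorem alt_cons_ne (x : String) (xs : List String) (hx : x ≠ "not") :
    combine_not_alt (x :: xs) = x :: combine_not_alt xs := by
  rw [combine_not_alt.eq_def]
  simp [hx]

theorem not_append_ne (y : String) : ("not " ++ y) ≠ "not" := by
  intro h
  have hlen := congrArg String.length h
  have h4 : ("not " : String).length = 4 := rfl
  have h3 : ("not" : String).length = 3 := rfl
  rw [String.length_append, h4, h3] at hlen
  omega

theorem set_eraseIdx_shape :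
    ∀ (ops : List String) (i : Nat) (v : String), i + 1 < ops.length →
      (ops.set i v).eraseIdx (i + 1) = ops.take i ++ v :: ops.drop (i + 2) := by
  intro ops
  induction ops with
  | nil => intro i v h; simp at h
  | cons a rest ih =>
    intro i v h
    cases i with
    | zero =>
      cases rest with
      | nil => simp at h
      | cons b r => simp [List.set, List.eraseIdx]
    | succ j =>
      simp only [List.length_cons] at h
      simp [List.set, ih j v (by omega)]

theorem loopA_eq_alt : ∀ (ops : List String) (i : Nat),
    combine_not_loopA ops i = ops.take i ++ combine_not_alt (ops.drop i) := by
  intro ops i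
  by_cases h : i < ops.length
  · have hdrop : ops.drop i = ops[i] :: ops.drop (i + 1) := List.drop_eq_getElem_cons h
    have hget : ops.getD i "" = ops[i] := List.getD_eq_getElem ops "" h
    by_cases hc : ops.getD i "" = "not" ∧ i + 1 < ops.length
    · have hdrop2 : ops.drop (i + 1) = ops[i + 1] :: ops.drop (i + 2) :=
        List.drop_eq_getElem_cons hc.2
      have hget2 : ops.getD (i + 1) "" = ops[i + 1] := List.getD_eq_getElem ops "" hc.2
      set v := "not " ++ ops.getD (i + 1) "" with hv
      have hshape : (ops.set i v).eraseIdx (i + 1) = ops.take i ++ v :: ops.drop (i + 2) :=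
        set_eraseIdx_shape ops i v hc.2
      rw [combine_not_loopA, dif_pos h, dif_pos hc,
        loopA_eq_alt ((ops.set i v).eraseIdx (i + 1)) i, hshape]
      have htake : (ops.take i ++ v :: ops.drop (i + 2)).take i = ops.take i := by
        rw [List.take_append_of_le_length (by simp; omega)]
        simp
      have hdropi : (ops.take i ++ v :: ops.drop (i + 2)).drop i = v :: ops.drop (i + 2) := by
        rw [List.drop_append_of_le_length (by simp; omega)]
        simp [List.drop_eq_nil_of_le]
      rw [htake, hdropi, alt_cons_ne _ _ (not_append_ne _), hdrop, hdrop2]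
      rw [hget] at hc
      simp only [List.getD] at hget2
      simp [combine_not_alt, hc.1, hget2]
    · rw [combine_not_loopA, dif_pos h, dif_neg hc, loopA_eq_alt ops (i + 1)]
      have htake : ops.take (i + 1) = ops.take i ++ [ops[i]] := by
        rw [List.take_add_one]
        simp [List.getElem?_eq_getElem h]
      rw [htake, hdrop, List.append_assoc]
      congr 1
      rcases Decidable.em (ops[i] = "not") with he | he
      · have : ¬ i + 1 < ops.length := by
          intro hlt; exact hc ⟨by rw [hget, he], hlt⟩
        have hnil : ops.drop (i + 1) = [] := by
          apply List.drop_eq_nil_of_le; omega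
        rw [hnil, he]
        simp [combine_not_alt]
      · rw [alt_cons_ne _ _ he]
        simp
  · rw [combine_not_loopA, dif_neg h]
    rw [List.drop_eq_nil_of_le (by omega), List.take_of_length_le (by omega)]
    simp [combine_not_alt]
termination_by ops i => ops.length - i
decreasing_by
  all_goals try omega
  all_goals (have h2 := hc.2; simp [List.length_eraseIdx, h2]; omega)

-- ===== VERDICT (by name: the statement is the Claim_ definition above) =====
theorem combine_not_spec : Claim_equal_combine_not := by
  intro ops _
  show combine_not ops = combine_not_alt ops
  rw [combine_not, loopA_eq_alt]
  simp
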